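-- pv_equiv track=rewrite | github.com/kth4778/Algorithm | 백준/Silver/4659. 비밀번호 발음하기/비밀번호 발음하기.py | case3
-- ===== SOURCE A (Python) =====
-- def case3(password):
--     word = None
--
--     for i in password:
--         if word == i:
--             if i == 'e' or i == 'o':
--                 continue
--             else:
--                 return False
--
--         word = i
--
--     return True
-- ===== SOURCE B (Python) =====
-- def case3(password):
--     # Stage 1: run-length encode the password with an index scan.
--     n = len(password)
--     runs = []
--     i = 0
--     while i < n:
--         j = i
--         while j < n and password[j] == password[i]:
--             j += 1
--         runs.append((password[i], j - i))
--         i = j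
--     # Stage 2: valid iff every run is a single char or its char is 'e'/'o'.
--     return all(ln == 1 or ch in 'eo' for ch, ln in runs)
-- ===== Notes on version B (the rewrite author's own statement) =====
-- stated objective: alternative
-- what changed: B run-length encodes the password into (char, run-length) pairs with an index scan and then validates the runs list (run length 1 or char in 'eo'), instead of A's single stateful previous-character scan with early return.
import Mathlib
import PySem

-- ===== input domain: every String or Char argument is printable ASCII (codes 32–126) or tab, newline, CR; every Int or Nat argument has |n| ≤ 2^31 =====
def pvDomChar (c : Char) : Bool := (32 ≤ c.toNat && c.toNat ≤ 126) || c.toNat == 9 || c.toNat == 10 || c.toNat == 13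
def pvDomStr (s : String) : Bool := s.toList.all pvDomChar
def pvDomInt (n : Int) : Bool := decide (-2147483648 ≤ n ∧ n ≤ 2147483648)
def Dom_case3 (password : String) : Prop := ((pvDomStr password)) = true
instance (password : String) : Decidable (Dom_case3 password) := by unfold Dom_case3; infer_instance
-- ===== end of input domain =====

-- B run-length encodes the password into (char, run length) pairs and then validates
-- that list, instead of A's stateful previous-character scan with early return.

-- ===== PORT A =====
-- A's loop: state `word : Option Char` (None initially); early return False on a
-- repeated character that is not 'e'/'o', else the state becomes the current char.
def case3Loop (word : Option Char) : List Char → Bool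
  | [] => true
  | i :: rest =>
      if word = some i then
        if i = 'e' ∨ i = 'o' then case3Loop word rest
        else false
      else case3Loop (some i) rest

def case3 (password : String) : Bool := case3Loop none password.toList

-- ===== PORT B =====
def findRunEnd (l : List Char) (c : Char) (j : Nat) : Nat :=
  if h : j < l.length then
    if l[j] == c then findRunEnd l c (j + 1) else j
  else j
termination_by l.length - j
theorem findRunEnd_ge (l : List Char) (c : Char) (j : Nat) : j ≤ findRunEnd l c j := by
  fun_induction findRunEnd l c j
  next j h hb ih => exact le_trans (by omega) ih
  next j h hb => exact le_refl j
  next j h => exact le_refl j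
def buildRuns (l : List Char) (i : Nat) : List (Char × Nat) :=
  if h : i < l.length then
    (l[i], findRunEnd l l[i] i - i) :: buildRuns l (findRunEnd l l[i] i)
  else []
termination_by l.length - i
decreasing_by
  have h1 : findRunEnd l l[i] i = findRunEnd l l[i] (i + 1) := by
    rw [findRunEnd]; simp [h]
  have h2 := findRunEnd_ge l l[i] (i + 1)
  omega
-- Source B: all(ln == 1 or ch in 'eo' for ch, ln in runs)
def case3_alt (password : String) : Bool :=
  (buildRuns password.toList 0).all
    (fun p => p.2 == 1 || p.1 == 'e' || p.1 == 'o')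

-- ===== PRECONDITION & SPEC =====
def Spec_case3 (password : String) (out : Bool) : Prop := out = case3_alt password
instance (password : String) (out : Bool) : Decidable (Spec_case3 password out) := by unfold Spec_case3; infer_instance

-- ===== CLAIM (what is proved, stated in full; the proofs are below) =====
def Claim_equal_case3 : Prop := ∀ (password : String), Dom_case3 password → Spec_case3 password (case3 password)

-- ===== LEMMAS AND PROOFS =====

-- proof-side structural run-length encoding, mirroring buildRuns
def buildRunsL : List Char → List (Char × Nat)
  | [] => []
  | c :: r =>
      (c, (r.takeWhile (· == c)).length + 1) :: buildRunsL (r.dropWhile (· == c))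
termination_by l => l.length
decreasing_by
  have := List.length_dropWhile_le (p := (· == c)) (l := r)
  simp; omega
theorem dropWhile_eq_drop {α : Type} (p : α → Bool) (l : List α) :
    l.dropWhile p = l.drop (l.takeWhile p).length := by
  induction l with
  | nil => rfl
  | cons a r ih =>
      by_cases h : p a
      · simp [List.takeWhile_cons, h, ih]
      · simp [List.takeWhile_cons, h]
theorem findRunEnd_eq (l : List Char) (c : Char) (j : Nat) :
    findRunEnd l c j = j + ((l.drop j).takeWhile (· == c)).length := by
  fun_induction findRunEnd l c j
  next j h hb ih =>
      have hd : l.drop j = l[j] :: l.drop (j + 1) := List.drop_eq_getElem_cons h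
      rw [ih, hd, List.takeWhile_cons, if_pos hb]
      simp; omega
  next j h hb =>
      have hd : l.drop j = l[j] :: l.drop (j + 1) := List.drop_eq_getElem_cons h
      rw [hd, List.takeWhile_cons, if_neg (by simp_all)]
      simp
  next j h =>
      have : l.drop j = [] := List.drop_eq_nil_of_le (by omega)
      simp [this]
theorem buildRuns_eq (l : List Char) (i : Nat) :
    buildRuns l i = buildRunsL (l.drop i) := by
  fun_induction buildRuns l i
  next i h ih =>
      have hd : l.drop i = l[i] :: l.drop (i + 1) := List.drop_eq_getElem_cons h
      have hj : findRunEnd l l[i] i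
          = i + 1 + ((l.drop (i + 1)).takeWhile (· == l[i])).length := by
        rw [findRunEnd_eq l l[i] i, hd, List.takeWhile_cons, if_pos (by simp),
          List.length_cons]
        omega
      rw [hd, buildRunsL, ih, hj, dropWhile_eq_drop, List.drop_drop]
      have h2 : i + 1 + ((l.drop (i + 1)).takeWhile (· == l[i])).length - i
          = ((l.drop (i + 1)).takeWhile (· == l[i])).length + 1 := by omega
      rw [h2, Nat.add_comm (i + 1)]
  next i h =>
      rw [List.drop_eq_nil_of_le (by omega : l.length ≤ i), buildRunsL]
def goodPairs : List Char → Bool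
  | [] => true
  | [_] => true
  | a :: b :: r => (!(a == b) || b == 'e' || b == 'o') && goodPairs (b :: r)
theorem runsCheck_le (n : Nat) : ∀ l : List Char, l.length ≤ n →
    (buildRunsL l).all (fun p => p.2 == 1 || p.1 == 'e' || p.1 == 'o') = goodPairs l := by
  induction n with
  | zero =>
      intro l hl
      have : l = [] := List.eq_nil_of_length_eq_zero (by omega)
      subst this
      rw [buildRunsL]
      rfl
  | succ n ihn =>
      intro l hl
      match l with
      | [] => rw [buildRunsL]; rfl
      | [c] => rw [buildRunsL]; simp [buildRunsL, goodPairs]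
      | c :: b :: r' =>
          by_cases hb : b = c
          · subst hb
            have e1 : buildRunsL (b :: b :: r')
                = (b, (r'.takeWhile (· == b)).length + 2)
                  :: buildRunsL (r'.dropWhile (· == b)) := by
              rw [buildRunsL, List.takeWhile_cons, if_pos (by simp),
                List.dropWhile_cons, if_pos (by simp), List.length_cons]
            have e2 : (buildRunsL (b :: r')).all
                  (fun p => p.2 == 1 || p.1 == 'e' || p.1 == 'o')
                = (((r'.takeWhile (· == b)).length + 1 == 1 || b == 'e' || b == 'o')
                  && (buildRunsL (r'.dropWhile (· == b))).all
                    (fun p => p.2 == 1 || p.1 == 'e' || p.1 == 'o')) := by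
              rw [buildRunsL, List.all_cons]
            have ih1 := ihn (b :: r') (by simp at hl ⊢; omega)
            have hk2 : ((r'.takeWhile (· == b)).length + 2 == 1) = false :=
              beq_eq_false_iff_ne.mpr (by omega)
            rw [e1, List.all_cons, goodPairs, ← ih1, e2]
            simp only [beq_self_eq_true, Bool.not_true, Bool.false_or, hk2]
            set X := (buildRunsL (r'.dropWhile (· == b))).all (fun p => p.2 == 1 || p.1 == 'e' || p.1 == 'o') with hX
            cases hbe : (b == 'e' || b == 'o') <;>
              simp only [hbe, Bool.true_and, Bool.false_and]
            rcases Bool.or_eq_true_iff.mp hbe with h | h <;>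
              simp only [h, Bool.or_true, Bool.true_or, Bool.true_and]
          · have e1 : buildRunsL (c :: b :: r')
                = (c, 1) :: buildRunsL (b :: r') := by
              rw [buildRunsL, List.takeWhile_cons, if_neg (by simp [hb]),
                List.dropWhile_cons, if_neg (by simp [hb])]
              rfl
            have ih1 := ihn (b :: r') (by simp at hl ⊢; omega)
            rw [e1, List.all_cons, ih1, goodPairs]
            have hbc : (c == b) = false := beq_eq_false_iff_ne.mpr (Ne.symm hb)
            simp only [hbc, Bool.not_false, Bool.true_or, Bool.true_and]
            simp

theorem runsCheck_eq_goodPairs (l : List Char) :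
    (buildRunsL l).all (fun p => p.2 == 1 || p.1 == 'e' || p.1 == 'o') = goodPairs l :=
  runsCheck_le l.length l le_rfl

theorem loop_eq_goodPairs (l : List Char) : ∀ c : Char,
    case3Loop (some c) l = goodPairs (c :: l) := by
  induction l with
  | nil => intro c; rfl
  | cons i r ih =>
      intro c
      by_cases hc : c = i
      · subst hc
        by_cases he : c = 'e' ∨ c = 'o'
        · rcases he with he | he <;> simp [case3Loop, goodPairs, he, ih]
        · push_neg at he
          simp [case3Loop, goodPairs, he.1, he.2]
      · simp [case3Loop, goodPairs, hc, ih]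

theorem case3_eq (password : String) : case3 password = case3_alt password := by
  unfold case3 case3_alt
  rw [buildRuns_eq, List.drop_zero, runsCheck_eq_goodPairs]
  cases password.toList with
  | nil => rfl
  | cons c r => simp [case3Loop, loop_eq_goodPairs]

-- ===== VERDICT (by name: the statement is the Claim_ definition above) =====
theorem case3_spec : Claim_equal_case3 := by
  intro p _
  unfold Spec_case3
  exact case3_eq p
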